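-- pv_equiv track=rewrite | github.com/arkadiusznowak1983/python_workspace | algorithm/search_pairs.py | searchThird
-- ===== SOURCE A (Python) =====
-- def searchThird(arr, k):
--     counter = 0
--     smallArray = {}
--     bigArray = []
--     highest = None
--     for elem in arr:
--         if elem > k:
--             highest = elem if highest is None or elem > highest else highest
--             bigArray.append(elem - k)
--         elif elem <= k:
--             smallArray[elem] = True
--
--     for elem in bigArray:
--         if elem <= highest - k:
--             smallArray[elem + k] = True
--
--     for i in range(len(bigArray)):
--         if smallArray.get(bigArray[i]) == True:
--             counter = counter + 1
--     return counter
-- ===== SOURCE B (Python) =====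
-- def searchThird(arr, k):
--     s = sorted(arr)
--     n = len(s)
--     count = 0
--     j = 0
--     for x in s:
--         if x <= k:
--             continue
--         t = x - k
--         while j < n and s[j] < t:
--             j += 1
--         if j < n and s[j] == t:
--             count += 1
--     return count
-- ===== Notes on version B (the rewrite author's own statement) =====
-- stated objective: alternative
-- what changed: Replaces A's hash-dict passes (small-element dict, bigArray of differences, re-add loop, indexed counting loop) with a comparison-based algorithm: sort the array once, then a single two-pointer sweep where a monotone pointer locates each x-k target, so no dict/set is used at all.
import Mathlib
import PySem

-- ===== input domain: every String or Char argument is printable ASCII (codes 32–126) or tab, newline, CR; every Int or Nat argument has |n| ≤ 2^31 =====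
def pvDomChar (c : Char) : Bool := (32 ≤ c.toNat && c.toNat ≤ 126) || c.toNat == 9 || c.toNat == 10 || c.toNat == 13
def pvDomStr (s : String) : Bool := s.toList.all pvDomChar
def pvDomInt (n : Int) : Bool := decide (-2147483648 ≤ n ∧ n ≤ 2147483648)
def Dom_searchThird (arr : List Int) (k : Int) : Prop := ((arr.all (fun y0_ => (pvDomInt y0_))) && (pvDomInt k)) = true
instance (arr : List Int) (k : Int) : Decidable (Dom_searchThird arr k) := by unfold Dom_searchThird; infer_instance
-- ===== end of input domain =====

-- B replaces A's hash-dict passes with a comparison-based algorithm: sort once, then one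
-- two-pointer sweep locating each x-k target with a monotone pointer; no dict/set at all.

-- ===== PORT A =====
-- state = (smallArray, bigArray, highest); Python's 'elif elem <= k' is the exact negation of
-- 'elem > k' on ints, so it is the plain else branch.  'highest - k' is only evaluated when
-- bigArray is nonempty, where highest is always some; '.getD 0' merely totalises that read.
def searchThird (arr : List Int) (k : Int) : Int :=
  let st := arr.foldl
    (fun (st : PySem.Dict Int Bool × List Int × Option Int) elem =>
      if elem > k then
        (st.1, st.2.1 ++ [elem - k],
          match st.2.2 with
          | none => some elem
          | some h => if elem > h then some elem else some h)
      else
        (st.1.insert elem true, st.2.1, st.2.2))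
    (PySem.Dict.empty, [], none)
  let small := st.2.1.foldl
    (fun (sm : PySem.Dict Int Bool) elem =>
      if elem ≤ st.2.2.getD 0 - k then sm.insert (elem + k) true else sm)
    st.1
  (PySem.List.pyRange 0 (st.2.1.length : Int) 1).foldl
    (fun c i => if small.get? (PySem.List.pyGetD st.2.1 i 0) = some true then c + 1 else c) 0

-- ===== PORT B =====
-- the 'while j < n and s[j] < t: j += 1' loop; s.getD is read only under the j < length guard
def pvAdvance (s : List Int) (t : Int) (j : Nat) : Nat :=
  if h : j < s.length ∧ s.getD j 0 < t then pvAdvance s t (j + 1) else j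
termination_by s.length - j
decreasing_by omega

def searchThird_alt (arr : List Int) (k : Int) : Int :=
  let s := PySem.List.sorted arr (fun x => x) false
  let n := s.length
  (s.foldl (fun (st : Int × Nat) x =>
      if x ≤ k then st
      else
        let t := x - k
        let j := pvAdvance s t st.2
        (if j < n ∧ s.getD j 0 = t then st.1 + 1 else st.1, j))
    (0, 0)).1

-- ===== PRECONDITION & SPEC =====
def Spec_searchThird (arr : List Int) (k : Int) (out : Int) : Prop := out = searchThird_alt arr k
instance (arr : List Int) (k : Int) (out : Int) : Decidable (Spec_searchThird arr k out) := by unfold Spec_searchThird; infer_instance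

-- ===== CLAIM (what is proved, stated in full; the proofs are below) =====
def Claim_equal_searchThird : Prop := ∀ (arr : List Int) (k : Int), Dom_searchThird arr k → Spec_searchThird arr k (searchThird arr k)

-- ===== LEMMAS AND PROOFS =====

-- ---------- A side: searchThird counts the x > k with x - k ∈ arr ----------

-- The combined triple fold of A's first loop is three independent folds.
theorem pv_split (k : Int) (l : List Int) (d : PySem.Dict Int Bool) (b : List Int) (h : Option Int) :
    l.foldl
      (fun (st : PySem.Dict Int Bool × List Int × Option Int) elem =>
        if elem > k then
          (st.1, st.2.1 ++ [elem - k],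
            match st.2.2 with
            | none => some elem
            | some h => if elem > h then some elem else some h)
        else
          (st.1.insert elem true, st.2.1, st.2.2)) (d, b, h)
    = (l.foldl (fun d e => if e > k then d else d.insert e true) d,
       l.foldl (fun b e => if e > k then b ++ [e - k] else b) b,
       l.foldl (fun h e => if e > k then
          (match h with
           | none => some e
           | some m => if e > m then some e else some m) else h) h) := by
  induction l generalizing d b h with
  | nil => rfl
  | cons e t ih =>
      simp only [List.foldl_cons]
      by_cases he : e > k <;> simp [he, ih]

-- smallArray after the first loop: value true at exactly the elements ≤ k seen so far.
theorem pv_get_small (k z : Int) (l : List Int) (d : PySem.Dict Int Bool) :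
    (l.foldl (fun d e => if e > k then d else d.insert e true) d).get? z
      = if z ∈ l ∧ z ≤ k then some true else d.get? z := by
  induction l generalizing d with
  | nil => simp
  | cons e t ih =>
      simp only [List.foldl_cons]
      by_cases he : e > k
      · rw [if_pos he, ih]
        have hiff : (z ∈ e :: t ∧ z ≤ k) ↔ (z ∈ t ∧ z ≤ k) := by
          simp only [List.mem_cons]
          constructor
          · rintro ⟨h1 | h1, h2⟩
            · omega
            · exact ⟨h1, h2⟩
          · exact fun ⟨h1, h2⟩ => ⟨Or.inr h1, h2⟩
        rw [if_congr hiff rfl rfl]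
      · rw [if_neg he, ih, PySem.Dict.get?_insert]
        split_ifs <;> simp_all [List.mem_cons]

-- running max: every element > k seen so far is bounded by the final 'highest'.
theorem pv_high (k : Int) (l : List Int) (h0 : Option Int) :
    (∀ m0, h0 = some m0 → ∃ m, (l.foldl (fun h e => if e > k then
          (match h with
           | none => some e
           | some m => if e > m then some e else some m) else h) h0) = some m ∧ m0 ≤ m)
    ∧ (∀ x ∈ l, x > k → ∃ m, (l.foldl (fun h e => if e > k then
          (match h with
           | none => some e
           | some m => if e > m then some e else some m) else h) h0) = some m ∧ x ≤ m) := by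
  induction l generalizing h0 with
  | nil => exact ⟨fun m0 h => ⟨m0, h, le_refl m0⟩, by simp⟩
  | cons e t ih =>
      simp only [List.foldl_cons]
      have step1 : ∀ m0, h0 = some m0 → ∃ m1,
          (if e > k then (match h0 with
            | none => some e
            | some m => if e > m then some e else some m) else h0) = some m1 ∧ m0 ≤ m1 := by
        intro m0 hm0
        subst hm0
        by_cases he : e > k
        · by_cases hem : e > m0
          · exact ⟨e, by simp [he, hem], by omega⟩
          · exact ⟨m0, by simp [he, hem], le_refl _⟩
        · exact ⟨m0, by simp [he], le_refl _⟩
      have step2 : e > k → ∃ m1,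
          (if e > k then (match h0 with
            | none => some e
            | some m => if e > m then some e else some m) else h0) = some m1 ∧ e ≤ m1 := by
        intro he
        cases h0 with
        | none => exact ⟨e, by simp [he], le_refl e⟩
        | some m0 =>
            by_cases hem : e > m0
            · exact ⟨e, by simp [he, hem], le_refl e⟩
            · exact ⟨m0, by simp [he, hem], by omega⟩
      refine ⟨?_, ?_⟩
      · intro m0 hm0
        obtain ⟨m1, hm1, hle1⟩ := step1 m0 hm0
        obtain ⟨m, hm, hle⟩ := (ih _).1 m1 hm1
        exact ⟨m, hm, le_trans hle1 hle⟩
      · intro x hx hxk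
        rcases List.mem_cons.mp hx with rfl | hx'
        · obtain ⟨m1, hm1, hle1⟩ := step2 hxk
          obtain ⟨m, hm, hle⟩ := (ih _).1 m1 hm1
          exact ⟨m, hm, le_trans hle1 hle⟩
        · exact (ih _).2 x hx' hxk

-- smallArray after the second loop (the re-add condition dropped separately).
theorem pv_get_small2 (k z : Int) (l : List Int) (d : PySem.Dict Int Bool) :
    (l.foldl (fun sm e => sm.insert (e + k) true) d).get? z
      = if z - k ∈ l then some true else d.get? z := by
  induction l generalizing d with
  | nil => simp
  | cons e t ih =>
      simp only [List.foldl_cons]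
      rw [ih, PySem.Dict.get?_insert]
      split_ifs <;> simp_all [List.mem_cons]
      omega

-- A's value in closed form.
theorem pv_A_count (arr : List Int) (k : Int) :
    searchThird arr k = (arr.countP (fun x => decide (x > k ∧ (x - k) ∈ arr)) : Int) := by
  unfold searchThird
  simp only [pv_split]
  set Bc : List Int := (arr.filter (fun x => decide (x > k))).map (fun x => x - k) with hBc
  have hBfold : arr.foldl (fun b e => if e > k then b ++ [e - k] else b) [] = Bc := by
    rw [PySem.List.foldl_append_ite (p := fun e => e > k) (f := fun e => e - k)]
    simp [hBc]
  have hBmem : ∀ e, e ∈ Bc ↔ (e + k ∈ arr ∧ e + k > k) := by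
    intro e
    simp only [hBc, List.mem_map, List.mem_filter, decide_eq_true_eq]
    constructor
    · rintro ⟨x, ⟨hx, hxk⟩, rfl⟩
      constructor <;> [simpa using hx; omega]
    · rintro ⟨h1, h2⟩
      exact ⟨e + k, ⟨h1, h2⟩, by omega⟩
  rw [hBfold]
  -- drop the always-true re-add condition in the second loop
  have hcongr : (Bc.foldl (fun sm e =>
        if e ≤ (arr.foldl (fun h e => if e > k then
          (match h with
           | none => some e
           | some m => if e > m then some e else some m) else h) none).getD 0 - k
        then sm.insert (e + k) true else sm)
        (arr.foldl (fun d e => if e > k then d else d.insert e true) PySem.Dict.empty))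
      = (Bc.foldl (fun sm e => sm.insert (e + k) true)
        (arr.foldl (fun d e => if e > k then d else d.insert e true) PySem.Dict.empty)) := by
    apply PySem.List.foldl_congr_mem
    intro sm e he
    obtain ⟨h1, h2⟩ := (hBmem e).mp he
    obtain ⟨m, hm, hle⟩ := (pv_high k arr none).2 (e + k) h1 h2
    rw [hm]
    simp only [Option.getD_some]
    rw [if_pos (by omega)]
  rw [hcongr]
  -- indexed counting loop = direct loop over Bc, then a countP
  rw [PySem.List.foldl_pyRange_zero_pyGetD' Bc 0
    (fun c e => if (Bc.foldl (fun sm e => sm.insert (e + k) true)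
      (arr.foldl (fun d e => if e > k then d else d.insert e true) PySem.Dict.empty)).get? e = some true
      then c + 1 else c) 0]
  rw [PySem.List.foldl_ite_add_one
    (p := fun e => (Bc.foldl (fun sm e => sm.insert (e + k) true)
      (arr.foldl (fun d e => if e > k then d else d.insert e true) PySem.Dict.empty)).get? e = some true)]
  simp only [zero_add]
  congr 1
  have hAcount : ∀ e ∈ Bc,
      (decide ((Bc.foldl (fun sm e => sm.insert (e + k) true)
        (arr.foldl (fun d e => if e > k then d else d.insert e true) PySem.Dict.empty)).get? e = some true))
      = decide (e ∈ arr) := by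
    intro e _
    rw [pv_get_small2, pv_get_small]
    by_cases h1 : e - k ∈ Bc
    · have he : e ∈ arr := by
        have := ((hBmem (e - k)).mp h1).1
        simpa using this
      simp [h1, he]
    · by_cases h2 : e ∈ arr ∧ e ≤ k
      · simp [h1, h2]
      · have hne : e ∉ arr := by
          intro hmem
          by_cases hek : e ≤ k
          · exact h2 ⟨hmem, hek⟩
          · exact h1 ((hBmem (e - k)).mpr ⟨by simpa using hmem, by omega⟩)
        simp [h1, hne, PySem.Dict.get?_empty]
  rw [List.countP_congr (fun x hx => by rw [hAcount x hx])]
  simp only [hBc, List.countP_map, List.countP_filter]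
  apply List.countP_congr
  intro x _
  simp only [Function.comp, decide_eq_true_eq, Bool.and_eq_true]
  constructor
  · rintro ⟨h1, h2⟩; exact ⟨h2, h1⟩
  · rintro ⟨h1, h2⟩; exact ⟨h2, h1⟩

-- ---------- B side: the two-pointer sweep counts the same thing ----------

theorem pvAdvance_ge (s : List Int) (t : Int) (j : Nat) : j ≤ pvAdvance s t j := by
  induction j using pvAdvance.induct (s := s) (t := t) with
  | case1 j h ih => rw [pvAdvance, dif_pos h]; omega
  | case2 j h => rw [pvAdvance, dif_neg h]

theorem pvAdvance_le (s : List Int) (t : Int) (j : Nat) (hj : j ≤ s.length) :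
    pvAdvance s t j ≤ s.length := by
  induction j using pvAdvance.induct (s := s) (t := t) with
  | case1 j h ih => rw [pvAdvance, dif_pos h]; exact ih (by omega)
  | case2 j h => rw [pvAdvance, dif_neg h]; exact hj

theorem pvAdvance_passed (s : List Int) (t : Int) (j : Nat) :
    ∀ i, j ≤ i → i < pvAdvance s t j → s.getD i 0 < t := by
  induction j using pvAdvance.induct (s := s) (t := t) with
  | case1 j h ih =>
      intro i hji hi
      rw [pvAdvance, dif_pos h] at hi
      rcases Nat.lt_or_ge i (j + 1) with hc | hc
      · have : i = j := by omega
        subst this; exact h.2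
      · exact ih i hc hi
  | case2 j h =>
      intro i hji hi
      rw [pvAdvance, dif_neg h] at hi
      omega

theorem pvAdvance_stop (s : List Int) (t : Int) (j : Nat)
    (h : pvAdvance s t j < s.length) : ¬ s.getD (pvAdvance s t j) 0 < t := by
  induction j using pvAdvance.induct (s := s) (t := t) with
  | case1 j hh ih =>
      rw [pvAdvance, dif_pos hh] at h ⊢
      exact ih h
  | case2 j hh =>
      rw [pvAdvance, dif_neg hh] at h ⊢
      intro hlt
      exact hh ⟨h, hlt⟩
-- the two-pointer loop invariant: everything strictly before j is below every remaining target
theorem pv_loop (s : List Int) (k : Int)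
    (hmono : ∀ p q : Nat, p ≤ q → q < s.length → s.getD p 0 ≤ s.getD q 0) :
    ∀ (rest : List Int) (c : Int) (j : Nat),
      j ≤ s.length →
      rest.Pairwise (· ≤ ·) →
      (∀ x ∈ rest, x > k → ∀ i : Nat, i < j → s.getD i 0 < x - k) →
      (rest.foldl (fun (st : Int × Nat) x =>
          if x ≤ k then st
          else
            ((if pvAdvance s (x - k) st.2 < s.length ∧
                 s.getD (pvAdvance s (x - k) st.2) 0 = x - k then st.1 + 1 else st.1),
              pvAdvance s (x - k) st.2))
        (c, j)).1
      = c + (rest.countP (fun x => decide (x > k ∧ (x - k) ∈ s)) : Int) := by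
  intro rest
  induction rest with
  | nil => intro c j _ _ _; simp
  | cons x rest ih =>
      intro c j hj hpw hinv
      simp only [List.foldl_cons]
      by_cases hx : x ≤ k
      · rw [if_pos hx, ih c j hj hpw.of_cons
          (fun y hy hyk i hi => hinv y (List.mem_cons_of_mem _ hy) hyk i hi)]
        have hpx : (decide (x > k ∧ (x - k) ∈ s)) = false := by
          simp only [decide_eq_false_iff_not]
          rintro ⟨h, -⟩
          omega
        rw [List.countP_cons, hpx]
        simp
      · rw [if_neg hx]
        have hxk : x > k := by omega
        set t := x - k with ht
        set j' := pvAdvance s t j with hj'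
        have hjj' : j ≤ j' := pvAdvance_ge s t j
        have hj'le : j' ≤ s.length := pvAdvance_le s t j hj
        -- the hit test is exactly membership of t in s
        have hmem : (j' < s.length ∧ s.getD j' 0 = t) ↔ t ∈ s := by
          constructor
          · rintro ⟨hlt, heq⟩
            rw [← heq]
            have : s.getD j' 0 = s[j'] := List.getD_eq_getElem s 0 hlt
            rw [this]
            exact List.getElem_mem hlt
          · intro hts
            obtain ⟨i, hi, heq⟩ := List.getElem_of_mem hts
            have hi_ge : j' ≤ i := by
              by_contra hlt
              push Not at hlt
              have hsi : s.getD i 0 < t := by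
                rcases Nat.lt_or_ge i j with hij | hij
                · exact hinv x (List.mem_cons_self) hxk i hij
                · exact pvAdvance_passed s t j i hij hlt
              rw [List.getD_eq_getElem s 0 hi, heq] at hsi
              omega
            have hj'lt : j' < s.length := lt_of_le_of_lt hi_ge hi
            refine ⟨hj'lt, ?_⟩
            have hle1 : s.getD j' 0 ≤ s.getD i 0 := hmono j' i hi_ge hi
            have hge : ¬ s.getD j' 0 < t := pvAdvance_stop s t j hj'lt
            rw [List.getD_eq_getElem s 0 hi, heq] at hle1
            omega
        -- invariant for the tail at the advanced pointer
        have hinv' : ∀ y ∈ rest, y > k → ∀ i : Nat, i < j' → s.getD i 0 < y - k := by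
          intro y hy hyk i hi
          have hxy : x ≤ y := (List.pairwise_cons.mp hpw).1 y hy
          rcases Nat.lt_or_ge i j with hij | hij
          · have := hinv x (List.mem_cons_self) hxk i hij
            omega
          · have := pvAdvance_passed s t j i hij hi
            omega
        rw [ih _ j' hj'le hpw.of_cons hinv']
        by_cases hhit : j' < s.length ∧ s.getD j' 0 = t
        · rw [if_pos hhit]
          have hts : t ∈ s := hmem.mp hhit
          have hpx : (decide (x > k ∧ (x - k) ∈ s)) = true := by
            simp only [decide_eq_true_eq]; exact ⟨hxk, by rw [← ht]; exact hts⟩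
          rw [List.countP_cons, hpx]
          simp
          omega
        · rw [if_neg hhit]
          have hts : t ∉ s := fun h => hhit (hmem.mpr h)
          have hpx : (decide (x > k ∧ (x - k) ∈ s)) = false := by
            simp only [decide_eq_false_iff_not]
            rintro ⟨-, hm⟩
            exact hts (by rw [ht]; exact hm)
          rw [List.countP_cons, hpx]
          simp

-- B's value in closed form, via the two-pointer invariant on the sorted copy.
theorem pv_B_count (arr : List Int) (k : Int) :
    searchThird_alt arr k = (arr.countP (fun x => decide (x > k ∧ (x - k) ∈ arr)) : Int) := by
  unfold searchThird_alt
  set s := PySem.List.sorted arr (fun x => x) false with hs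
  have hmono : ∀ p q : Nat, p ≤ q → q < s.length → s.getD p 0 ≤ s.getD q 0 := by
    intro p q hpq hq
    have hp : p < s.length := lt_of_le_of_lt hpq hq
    rw [List.getD_eq_getElem s 0 hp, List.getD_eq_getElem s 0 hq]
    exact PySem.List.sorted_id_getElem_mono arr hpq hq
  have hpw : s.Pairwise (· ≤ ·) := by
    have := PySem.List.sorted_pairwise arr (fun x => x)
    simpa using this
  have := pv_loop s k hmono s 0 0 (Nat.zero_le _) hpw (by intro x _ _ i hi; omega)
  simp only [] at this
  rw [this]
  have hperm : s.Perm arr := PySem.List.sorted_perm arr (fun x => x) false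
  rw [List.countP_congr (l := s)
    (p := fun x => decide (x > k ∧ (x - k) ∈ s))
    (q := fun x => decide (x > k ∧ (x - k) ∈ arr))
    (by intro x _; simp [hperm.mem_iff])]
  rw [hperm.countP_eq]
  simp

-- ===== VERDICT (by name: the statement is the Claim_ definition above) =====
theorem searchThird_spec : Claim_equal_searchThird := by
  intro arr k _
  unfold Spec_searchThird
  rw [pv_A_count, pv_B_count]
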